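-- pv_equiv track=rewrite | github.com/baconlang/python | tests/test_example.py | evaluator
-- ===== SOURCE A (Python) =====
-- def evaluator(symbols):
--     available = dict(
--         pasta=2,
--         lettuce=2,
--         soap=2,
--         ham_buns=2,
--         hamburgers=2,
--         hot_buns=2,
--         hotdogs=2,
--         potatos=2,
--     )
--
--     for symbol in symbols:
--         if symbol == "food_lion":
--             return False
--
--         if symbol == "harris_teeter":
--             continue
--
--         if available.get(symbol):
--             available[symbol] -= 1
--             continue
--         else:
--             return False
--
--     return True
-- ===== SOURCE B (Python) =====
-- def evaluator(symbols):
--     AVAILABLE = {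
--         "pasta": 2, "lettuce": 2, "soap": 2, "ham_buns": 2,
--         "hamburgers": 2, "hot_buns": 2, "hotdogs": 2, "potatos": 2,
--     }
--     counts = {}
--     for s in symbols:
--         if s != "harris_teeter":
--             counts[s] = counts.get(s, 0) + 1
--     return all(AVAILABLE.get(s, 0) >= c for s, c in counts.items())
-- ===== Notes on version B (the rewrite author's own statement) =====
-- stated objective: simpler
-- what changed: Replaces the consume-inventory loop that decrements a mutable availability dict and early-returns on each failing symbol by a tally-then-threshold check: one pass builds a frequency table of all symbols except harris_teeter, then each distinct (symbol,count) pair is compared against the fixed availability (unknown symbols and food_lion get 0).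
import Mathlib
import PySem

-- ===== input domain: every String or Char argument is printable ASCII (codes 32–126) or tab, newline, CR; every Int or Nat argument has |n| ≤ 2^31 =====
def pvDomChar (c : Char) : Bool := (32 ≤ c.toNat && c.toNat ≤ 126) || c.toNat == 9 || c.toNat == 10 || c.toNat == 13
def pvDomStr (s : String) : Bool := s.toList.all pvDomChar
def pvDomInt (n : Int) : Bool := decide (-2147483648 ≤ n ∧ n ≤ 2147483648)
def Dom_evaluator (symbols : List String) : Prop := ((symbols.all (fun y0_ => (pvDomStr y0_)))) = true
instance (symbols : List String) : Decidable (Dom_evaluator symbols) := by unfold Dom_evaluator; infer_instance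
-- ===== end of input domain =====

-- B replaces A's decrement-an-inventory-dict loop with early returns by a tally of the
-- non-harris_teeter symbols followed by a threshold check of each distinct (symbol, count) pair.

-- ===== PORT A =====
def pvAvailA : PySem.Dict String Int :=
  PySem.Dict.ofList [("pasta", 2), ("lettuce", 2), ("soap", 2), ("ham_buns", 2),
    ("hamburgers", 2), ("hot_buns", 2), ("hotdogs", 2), ("potatos", 2)]

-- the 'for symbol in symbols' loop, carrying the mutable 'available' dict
def pvLoopA : List String → PySem.Dict String Int → Bool
  | [], _ => true
  | symbol :: rest, available =>
    if symbol == "food_lion" then false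
    else if symbol == "harris_teeter" then pvLoopA rest available
    else
      match available.get? symbol with       -- 'if available.get(symbol):' truthiness
      | some v => if v != 0 then pvLoopA rest (available.insert symbol (v - 1)) else false
      | none => false

def evaluator (symbols : List String) : Bool := pvLoopA symbols pvAvailA

-- ===== PORT B =====
def pvAvailB : PySem.Dict String Int :=
  PySem.Dict.ofList [("pasta", 2), ("lettuce", 2), ("soap", 2), ("ham_buns", 2),
    ("hamburgers", 2), ("hot_buns", 2), ("hotdogs", 2), ("potatos", 2)]

def evaluator_alt (symbols : List String) : Bool :=
  let counts := symbols.foldl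
    (fun d s => if s != "harris_teeter" then d.insert s (d.getD s 0 + 1) else d)
    PySem.Dict.empty
  counts.items.all (fun p => decide (pvAvailB.getD p.1 0 ≥ p.2))

-- ===== PRECONDITION & SPEC =====
def Spec_evaluator (symbols : List String) (out : Bool) : Prop := out = evaluator_alt symbols
instance (symbols : List String) (out : Bool) : Decidable (Spec_evaluator symbols out) := by unfold Spec_evaluator; infer_instance

-- ===== CLAIM (what is proved, stated in full; the proofs are below) =====
def Claim_equal_evaluator : Prop := ∀ (symbols : List String), Dom_evaluator symbols → Spec_evaluator symbols (evaluator symbols)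

-- ===== LEMMAS AND PROOFS =====

lemma pvAvail_nonneg : ∀ k, 0 ≤ pvAvailA.getD k 0 := by
  intro k
  simp [pvAvailA, PySem.Dict.ofList, PySem.Dict.update, PySem.Dict.getD_insert]
  split_ifs <;> simp

lemma pvLoopA_eq_true_iff (syms : List String) (d : PySem.Dict String Int)
    (hpos : ∀ k, 0 ≤ d.getD k 0) :
    pvLoopA syms d = true ↔
      ∀ s ∈ syms, s ≠ "food_lion" ∧
        (s = "harris_teeter" ∨ (syms.count s : Int) ≤ d.getD s 0) := by
  induction syms generalizing d with
  | nil => simp [pvLoopA]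
  | cons a rest ih =>
    by_cases hfl : a = "food_lion"
    · subst hfl
      simp [pvLoopA]
    by_cases hht : a = "harris_teeter"
    · subst hht
      have hL : pvLoopA ("harris_teeter" :: rest) d = pvLoopA rest d := by
        simp [pvLoopA]
      rw [hL, ih d hpos]
      constructor
      · intro h s hs
        rcases List.mem_cons.mp hs with rfl | hs'
        · exact ⟨by simp, Or.inl rfl⟩
        · by_cases hsa : s = "harris_teeter"
          · exact ⟨by simp [hsa], Or.inl hsa⟩
          · obtain ⟨h1, h2⟩ := h s hs'
            refine ⟨h1, ?_⟩
            rcases h2 with h2 | h2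
            · exact Or.inl h2
            · right
              rw [List.count_cons_of_ne (fun h => hsa h.symm)]; exact h2
      · intro h s hs
        obtain ⟨h1, h2⟩ := h s (List.mem_cons_of_mem _ hs)
        refine ⟨h1, ?_⟩
        rcases h2 with h2 | h2
        · exact Or.inl h2
        · by_cases hsa : s = "harris_teeter"
          · exact Or.inl hsa
          · right
            rw [List.count_cons_of_ne (fun h => hsa h.symm)] at h2; exact h2
    · -- ordinary symbol
      have hL : pvLoopA (a :: rest) d =
          (match d.get? a with
           | some v => if v != 0 then pvLoopA rest (d.insert a (v - 1)) else false
           | none => false) := by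
        simp [pvLoopA, hfl, hht]
      rw [hL]
      cases hg : d.get? a with
      | none =>
        have h0 : d.getD a 0 = 0 := PySem.Dict.getD_of_get?_eq_none d 0 hg
        dsimp only
        simp only [Bool.false_eq_true, false_iff]
        intro h
        obtain ⟨_, h2⟩ := h a List.mem_cons_self
        rcases h2 with h2 | h2
        · exact hht h2
        · rw [h0] at h2
          have hc : 0 < (a :: rest).count a := by simp
          omega
      | some v =>
        have hv0 : d.getD a 0 = v := PySem.Dict.getD_of_get?_eq_some d 0 hg
        by_cases hv : v = 0
        · subst hv
          dsimp only
          rw [if_neg (by simp)]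
          simp only [Bool.false_eq_true, false_iff]
          intro h
          obtain ⟨_, h2⟩ := h a List.mem_cons_self
          rcases h2 with h2 | h2
          · exact hht h2
          · rw [hv0] at h2
            have hc : 0 < (a :: rest).count a := by simp
            omega
        · have hvpos : 1 ≤ v := by have := hpos a; rw [hv0] at this; omega
          have hpos' : ∀ k, 0 ≤ (d.insert a (v - 1)).getD k 0 := by
            intro k
            rw [PySem.Dict.getD_insert]
            split_ifs with hk
            · omega
            · exact hpos k
          have hstep : (if v != 0 then pvLoopA rest (d.insert a (v - 1)) else false) =
              pvLoopA rest (d.insert a (v - 1)) := by simp [hv]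
          dsimp only
          rw [hstep, ih _ hpos']
          constructor
          · intro h s hs
            rcases List.mem_cons.mp hs with rfl | hs'
            · refine ⟨hfl, Or.inr ?_⟩
              rw [hv0]
              by_cases hmem : s ∈ rest
              · obtain ⟨_, h2⟩ := h s hmem
                rcases h2 with h2 | h2
                · exact absurd h2 hht
                · rw [PySem.Dict.getD_insert, if_pos rfl] at h2
                  have : (s :: rest).count s = rest.count s + 1 := by simp
                  rw [this]; push_cast; omega
              · have : (s :: rest).count s = 1 := by
                  simp [List.count_eq_zero_of_not_mem hmem]
                rw [this]; push_cast; omega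
            · by_cases hsa : s = a
              · subst hsa
                refine ⟨hfl, Or.inr ?_⟩
                rw [hv0]
                obtain ⟨_, h2⟩ := h s hs'
                rcases h2 with h2 | h2
                · exact absurd h2 hht
                · rw [PySem.Dict.getD_insert, if_pos rfl] at h2
                  have : (s :: rest).count s = rest.count s + 1 := by simp
                  rw [this]; push_cast; omega
              · obtain ⟨h1, h2⟩ := h s hs'
                refine ⟨h1, ?_⟩
                rcases h2 with h2 | h2
                · exact Or.inl h2
                · right
                  rw [PySem.Dict.getD_insert, if_neg hsa] at h2
                  rw [List.count_cons_of_ne (fun h => hsa h.symm)]; exact h2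
          · intro h t ht
            by_cases hta : t = a
            · subst hta
              refine ⟨hfl, Or.inr ?_⟩
              rw [PySem.Dict.getD_insert, if_pos rfl]
              obtain ⟨_, h2⟩ := h t (List.mem_cons_self)
              rcases h2 with h2 | h2
              · exact absurd h2 hht
              · rw [hv0] at h2
                have : (t :: rest).count t = rest.count t + 1 := by simp
                rw [this] at h2; push_cast at h2 ⊢; omega
            · obtain ⟨h1, h2⟩ := h t (List.mem_cons_of_mem _ ht)
              refine ⟨h1, ?_⟩
              rcases h2 with h2 | h2
              · exact Or.inl h2
              · right
                rw [PySem.Dict.getD_insert, if_neg hta]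
                rw [List.count_cons_of_ne (fun h => hta h.symm)] at h2; exact h2

lemma evaluator_alt_eq_true_iff (syms : List String) :
    evaluator_alt syms = true ↔
      ∀ k ∈ syms.filter (fun s => s != "harris_teeter"),
        ((syms.filter (fun s => s != "harris_teeter")).count k : Int) ≤ pvAvailB.getD k 0 := by
  unfold evaluator_alt
  rw [PySem.List.foldl_if_eq_foldl_filter, PySem.Dict.foldl_insert_getD_add_one_eq_counter]
  simp only [PySem.Dict.items_counter]
  simp only [List.all_eq_true, List.mem_map, PySem.Set.mem_ofList]
  constructor
  · intro h k hk
    have := h (k, ((syms.filter (fun s => s != "harris_teeter")).count k : Int)) ⟨k, hk, rfl⟩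
    simpa using this
  · intro h p hp
    obtain ⟨k, hk, rfl⟩ := hp
    simpa using h k hk

-- ===== VERDICT (by name: the statement is the Claim_ definition above) =====
theorem evaluator_spec : Claim_equal_evaluator := by
  intro syms _
  unfold Spec_evaluator
  have havail : ∀ k, pvAvailA.getD k 0 = pvAvailB.getD k 0 := fun _ => rfl
  have hfl0 : pvAvailB.getD "food_lion" 0 = 0 := by decide
  have hiff : evaluator syms = true ↔ evaluator_alt syms = true := by
    rw [show evaluator syms = pvLoopA syms pvAvailA from rfl,
      pvLoopA_eq_true_iff syms pvAvailA pvAvail_nonneg, evaluator_alt_eq_true_iff syms]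
    constructor
    · intro h k hk
      obtain ⟨hk1, hk2⟩ := List.mem_filter.mp hk
      obtain ⟨h1, h2⟩ := h k hk1
      rcases h2 with h2 | h2
      · simp [h2] at hk2
      · have hcf : (List.filter (fun s => s != "harris_teeter") syms).count k = syms.count k :=
          List.count_filter hk2
        rw [hcf, ← havail]
        exact h2
    · intro h s hs
      have hnf : s ≠ "food_lion" := by
        rintro rfl
        have hmem : "food_lion" ∈ syms.filter (fun s => s != "harris_teeter") :=
          List.mem_filter.mpr ⟨hs, by decide⟩
        have := h _ hmem
        rw [hfl0] at this
        have hc := List.count_pos_iff.mpr hmem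
        omega
      refine ⟨hnf, ?_⟩
      by_cases hht : s = "harris_teeter"
      · exact Or.inl hht
      · right
        have hp : (s != "harris_teeter") = true := by simpa using hht
        have hmem : s ∈ syms.filter (fun s => s != "harris_teeter") :=
          List.mem_filter.mpr ⟨hs, hp⟩
        have hcf : (List.filter (fun s => s != "harris_teeter") syms).count s = syms.count s :=
          List.count_filter hp
        have := h s hmem
        rw [hcf, ← havail] at this
        exact this
  cases hA : evaluator syms <;> cases hB : evaluator_alt syms <;> simp_all
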